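-- pv_equiv track=rewrite | github.com/lirondos/lazaro | utils/span_evaluation.py | labels_to_span_dict
-- ===== SOURCE A (Python) =====
-- from typing import Sequence, Dict, List, NamedTuple, Tuple, Counter, Set, Optional
-- from collections import defaultdict
--
-- class Span(NamedTuple):
--     start_token: int
--     end_token: int
--
-- def labels_to_span_dict(labels: Sequence[str]) -> Dict[str, Set[Span]]:
--     spans = defaultdict(set)
--     tag_interruptus = False
--     span_type = None
--     initial = None
--     for i, label in enumerate(labels):
--         if (label == "O"):  # The current label is O
--             if tag_interruptus:  # If we were in the middle of a span, we create it and append it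
--                 spans[span_type].add(Span(initial, i))
--             tag_interruptus = False  # We are no longer in the middle of a tag
--         else:  # The current label is B I
--             label_type = label.split("-")[1]  # We get the type (PER, MISC, etc)
--             if tag_interruptus:  # if we were in the middle of a tag
--                 if label_type != span_type or label.startswith("B"):  # and the types dont match or current tag is B
--                     spans[span_type].add(Span(initial, i))  # we close the previous span and append it
--                     span_type = label_type  # we are now in the middle of a new span
--                     initial = i
--             else:  # we were not in the middle of a span
--                 initial = i  # initial position will be the current position
--                 tag_interruptus = True  # we are now in the middle of a span
--                 span_type = label_type
--     if tag_interruptus:  # this covers entities at the end of the sentence (we left a tag_interruptus at the end of the list)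
--         spans[span_type].add(Span(initial, len(labels)))
--     return spans
-- ===== SOURCE B (Python) =====
-- from typing import Sequence, Dict, Set, NamedTuple
-- from collections import defaultdict
--
-- class Span(NamedTuple):
--     start_token: int
--     end_token: int
--
-- def labels_to_span_dict(labels: Sequence[str]) -> Dict[str, Set[Span]]:
--     # Index-jumping scan: at each entity start, consume the whole maximal run
--     # with an inner while, then jump past it; no per-token open/close state.
--     labels = list(labels)
--     n = len(labels)
--     spans = defaultdict(set)
--     i = 0
--     while i < n:
--         if labels[i] == "O":
--             i += 1
--             continue
--         t = labels[i].split("-")[1]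
--         j = i + 1
--         while (j < n and labels[j] != "O"
--                and not labels[j].startswith("B")
--                and labels[j].split("-")[1] == t):
--             j += 1
--         spans[t].add(Span(i, j))
--         i = j
--     return spans
-- ===== Notes on version B (the rewrite author's own statement) =====
-- stated objective: simpler
-- what changed: Replaces A's per-token open/close state machine (tag_interruptus/span_type/initial flags threaded through one enumerate loop) by an index-jumping scan: at each entity start an inner while consumes the whole maximal run and the outer index jumps past it, adding the span immediately.
import Mathlib
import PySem

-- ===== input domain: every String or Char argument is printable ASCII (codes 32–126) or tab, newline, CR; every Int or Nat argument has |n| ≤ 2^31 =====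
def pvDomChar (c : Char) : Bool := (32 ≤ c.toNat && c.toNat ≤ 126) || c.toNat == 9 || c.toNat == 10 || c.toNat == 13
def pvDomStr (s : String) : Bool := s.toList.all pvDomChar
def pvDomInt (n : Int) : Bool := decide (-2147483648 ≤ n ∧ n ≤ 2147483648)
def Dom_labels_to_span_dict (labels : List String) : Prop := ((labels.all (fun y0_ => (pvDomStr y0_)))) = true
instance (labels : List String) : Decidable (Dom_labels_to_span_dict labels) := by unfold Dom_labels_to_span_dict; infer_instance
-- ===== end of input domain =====

-- B replaces A's flag-based open/close state machine by an index-jumping scan (inner while per entity run); same return value, objective: simpler.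
-- ===== PORT A =====
-- Split "label.split('-')[1]": total form pyGetD with default "" — Pre_ excludes the inputs where Python raises IndexError.
def pvLabelType (l : String) : String :=
  PySem.List.pyGetD ((PySem.Str.split? l "-").getD []) 1 ""

-- the for-loop of A, one step per remaining label; n = len(labels) for the trailing close
def pvALoop (rest : List String) (i : Int)
    (spans : PySem.Dict String (PySem.Set (Int × Int)))
    (ti : Bool) (st : Option String) (init : Option Int) (n : Int) :
    PySem.Dict String (PySem.Set (Int × Int)) :=
  match rest with
  | [] =>
      if ti then
        spans.insert (st.getD "") (PySem.Set.add (spans.getD (st.getD "") []) (init.getD 0, n))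
      else spans
  | l :: ls =>
      if l = "O" then
        if ti then
          pvALoop ls (i + 1)
            (spans.insert (st.getD "") (PySem.Set.add (spans.getD (st.getD "") []) (init.getD 0, i)))
            false st init n
        else pvALoop ls (i + 1) spans false st init n
      else
        let lt := pvLabelType l
        if ti then
          if some lt ≠ st ∨ PySem.Str.startswith l "B" = true then
            pvALoop ls (i + 1)
              (spans.insert (st.getD "") (PySem.Set.add (spans.getD (st.getD "") []) (init.getD 0, i)))
              true (some lt) (some i) n
          else pvALoop ls (i + 1) spans true st init n
        else pvALoop ls (i + 1) spans true (some lt) (some i) n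

def labels_to_span_dict (labels : List String) : List (String × List (Int × Int)) :=
  (pvALoop labels 0 PySem.Dict.empty false none none (labels.length : Int)).items

-- ===== PORT B =====
-- inner while: consume the run continuing a span of type t starting scan at index j
def pvBScan (t : String) (j : Int) (rest : List String) : Int × List String :=
  match rest with
  | [] => (j, [])
  | l :: ls =>
      if l ≠ "O" ∧ PySem.Str.startswith l "B" = false ∧ pvLabelType l = t then
        pvBScan t (j + 1) ls
      else (j, l :: ls)

theorem pvBScan_len_le (t : String) (j : Int) (rest : List String) :
    (pvBScan t j rest).2.length ≤ rest.length := by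
  induction rest generalizing j with
  | nil => simp [pvBScan]
  | cons l ls ih =>
      simp only [pvBScan]
      split
      · exact le_trans (ih (j + 1)) (Nat.le_succ _)
      · exact le_refl _

-- outer while over the remaining suffix; i is the absolute index of its head
def pvBLoop (rest : List String) (i : Int)
    (spans : PySem.Dict String (PySem.Set (Int × Int))) :
    PySem.Dict String (PySem.Set (Int × Int)) :=
  match rest with
  | [] => spans
  | l :: ls =>
      if l = "O" then pvBLoop ls (i + 1) spans
      else
        let t := pvLabelType l
        let p := pvBScan t (i + 1) ls
        pvBLoop p.2 p.1 (spans.insert t (PySem.Set.add (spans.getD t []) (i, p.1)))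
termination_by rest.length
decreasing_by
  · simp
  · exact Nat.lt_succ_of_le (pvBScan_len_le _ _ _)

def labels_to_span_dict_alt (labels : List String) : List (String × List (Int × Int)) :=
  (pvBLoop labels 0 PySem.Dict.empty).items

-- ===== PRECONDITION & SPEC =====
-- Pre_ excludes exactly the inputs where Python A raises IndexError: a non-"O" label with no "-".
def Pre_labels_to_span_dict (labels : List String) : Prop :=
  ∀ l ∈ labels, l ≠ "O" → '-' ∈ l.toList
instance (labels : List String) : Decidable (Pre_labels_to_span_dict labels) := by
  unfold Pre_labels_to_span_dict; infer_instance
def pvWitness_labels_to_span_dict : List String := ["B-PER", "I-PER", "O", "B-LOC"]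

def Spec_labels_to_span_dict (labels : List String) (out : List (String × List (Int × Int))) : Prop := out = labels_to_span_dict_alt labels
instance (labels : List String) (out : List (String × List (Int × Int))) : Decidable (Spec_labels_to_span_dict labels out) := by unfold Spec_labels_to_span_dict; infer_instance

-- ===== CLAIM (what is proved, stated in full; the proofs are below) =====
def Claim_equal_labels_to_span_dict : Prop := ∀ (labels : List String), Dom_labels_to_span_dict labels → Pre_labels_to_span_dict labels → Spec_labels_to_span_dict labels (labels_to_span_dict labels)

-- ===== LEMMAS AND PROOFS =====

-- A's state machine equals B's jumping scan, for both a closed and an open state.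
theorem pv_key (rest : List String) :
    (∀ (i : Int) spans st init,
        pvALoop rest i spans false st init (i + rest.length) = pvBLoop rest i spans) ∧
    (∀ (i : Int) spans (t : String) (s : Int),
        pvALoop rest i spans true (some t) (some s) (i + rest.length) =
          pvBLoop (pvBScan t i rest).2 (pvBScan t i rest).1
            (spans.insert t (PySem.Set.add (spans.getD t []) (s, (pvBScan t i rest).1)))) := by
  induction rest with
  | nil =>
      refine ⟨fun i spans st init => by simp [pvALoop, pvBLoop], fun i spans t s => ?_⟩
      show (spans.insert ((some t).getD "") _) = _
      simp only [pvBScan, pvBLoop, Option.getD_some, List.length_nil]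
      norm_num
  | cons l ls ih =>
      obtain ⟨ihC, ihO⟩ := ih
      have hlen : ∀ i : Int, i + ((l :: ls).length : Int) = (i + 1) + (ls.length : Int) := by
        intro i; simp; ring
      constructor
      · intro i spans st init
        rw [hlen]
        by_cases hO : l = "O"
        · show (if l = "O" then _ else _) = _
          rw [if_pos hO, if_neg Bool.false_ne_true]
          simp only [pvBLoop, if_pos hO]
          exact ihC (i + 1) spans st init
        · show (if l = "O" then _ else _) = _
          rw [if_neg hO, if_neg Bool.false_ne_true]
          simp only [pvBLoop, if_neg hO]
          exact ihO (i + 1) spans (pvLabelType l) i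
      · intro i spans t s
        rw [hlen]
        by_cases hO : l = "O"
        · -- close at O: the scan stops here, then B also skips the O
          have hstop : ¬ (l ≠ "O" ∧ PySem.Str.startswith l "B" = false ∧ pvLabelType l = t) := by
            intro h; exact h.1 hO
          have hscan : pvBScan t i (l :: ls) = (i, l :: ls) := by
            show (if _ then _ else _) = _
            rw [if_neg hstop]
          rw [hscan]
          show (if l = "O" then _ else _) = _
          rw [if_pos hO, if_pos rfl]
          simp only [pvBLoop, if_pos hO, Option.getD_some]
          exact ihC (i + 1) _ (some t) (some s)
        · by_cases hcont : l ≠ "O" ∧ PySem.Str.startswith l "B" = false ∧ pvLabelType l = t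
          · -- continuation: same type, not B
            have hscan : pvBScan t i (l :: ls) = pvBScan t (i + 1) ls := by
              show (if _ then _ else _) = _
              rw [if_pos hcont]
            rw [hscan]
            have hcond : ¬ (some (pvLabelType l) ≠ some t ∨ PySem.Str.startswith l "B" = true) := by
              rintro (h | h)
              · exact h (by rw [hcont.2.2])
              · rw [hcont.2.1] at h; exact Bool.false_ne_true h
            show (if l = "O" then _ else _) = _
            rw [if_neg hO, if_pos rfl, if_neg hcond]
            exact ihO (i + 1) spans t s
          · -- close-and-reopen: type change or a B tag
            have hscan : pvBScan t i (l :: ls) = (i, l :: ls) := by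
              show (if _ then _ else _) = _
              rw [if_neg hcont]
            rw [hscan]
            have hcond : some (pvLabelType l) ≠ some t ∨ PySem.Str.startswith l "B" = true := by
              rcases Bool.eq_false_or_eq_true (PySem.Str.startswith l "B") with hb | hb
              · right; exact hb
              · left
                intro h
                exact hcont ⟨hO, hb, by simpa using h⟩
            show (if l = "O" then _ else _) = _
            rw [if_neg hO, if_pos rfl, if_pos hcond]
            simp only [pvBLoop, if_neg hO, Option.getD_some]
            exact ihO (i + 1) _ (pvLabelType l) i

-- ===== VERDICT (by name: the statement is the Claim_ definition above) =====
theorem labels_to_span_dict_spec : Claim_equal_labels_to_span_dict := by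
  intro labels _ _
  unfold Spec_labels_to_span_dict labels_to_span_dict labels_to_span_dict_alt
  have h := (pv_key labels).1 0 PySem.Dict.empty none none
  rw [show (labels.length : Int) = 0 + labels.length by ring, h]
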